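-- pv_equiv track=rewrite | github.com/mizuy/seqtool | seqtool/nucleotide/__init__.py | is_repeat
-- ===== SOURCE A (Python) =====
-- def is_repeat(seq,i,repeatno=8):
--     v = seq[i]
--     tail = 0
--     for t in seq[i+1:]:
--         if t!=v:
--             break
--         tail += 1
--     head = 0
--     for t in seq[:i][::-1]:
--         if t!=v:
--             break
--         head += 1
--     return tail+head+1 >= repeatno
-- ===== SOURCE B (Python) =====
-- def is_repeat(seq, i, repeatno=8):
--     # Single forward run-scan: normalize i, then walk maximal runs from the
--     # left until the run containing i is found; answer is its length.
--     n = len(seq)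
--     j = i + n if i < 0 else i
--     if not (0 <= j < n):
--         raise IndexError("string index out of range")
--     start = 0
--     while True:
--         end = start + 1
--         while end < n and seq[end] == seq[start]:
--             end += 1
--         if j < end:
--             return end - start >= repeatno
--         start = end
-- ===== Notes on version B (the rewrite author's own statement) =====
-- stated objective: alternative
-- what changed: Replaces A's two outward scans anchored at seq[i] (forward over seq[i+1:], backward over seq[:i] reversed) by a single left-to-right scan over maximal runs that stops at the run containing the normalized index.
-- intended difference: For i = -1 (and only then), seq[i+1:] is seq[0:] = the whole string, so A adds the string's leading run of the last character to the true run length and returns True for repeatno values up to that inflated count; B returns whether the actual run containing the last character has length >= repeatno, which is the intended meaning of the function. — e.g. on is_repeat("aa", -1, 3): A returns true, B returns false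
import Mathlib
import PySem

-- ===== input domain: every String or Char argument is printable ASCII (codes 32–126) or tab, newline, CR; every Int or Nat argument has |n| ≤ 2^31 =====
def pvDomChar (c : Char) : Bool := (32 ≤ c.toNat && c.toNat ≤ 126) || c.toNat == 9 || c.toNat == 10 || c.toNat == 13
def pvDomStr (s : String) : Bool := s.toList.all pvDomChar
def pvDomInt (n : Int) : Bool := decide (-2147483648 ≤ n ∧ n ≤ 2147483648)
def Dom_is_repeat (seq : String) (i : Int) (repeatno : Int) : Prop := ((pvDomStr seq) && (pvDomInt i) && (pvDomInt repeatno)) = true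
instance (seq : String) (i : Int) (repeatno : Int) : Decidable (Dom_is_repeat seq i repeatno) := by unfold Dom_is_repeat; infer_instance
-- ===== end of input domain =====

-- B replaces A's two outward scans anchored at seq[i] by one forward scan over
-- maximal runs (objective: alternative decomposition, same cost); for i = -1 it
-- returns the intended answer where A over-counts (see D_ below).

-- ===== PORT A =====
-- the 'for t in …: if t != v: break; cnt += 1' loop of A
def runA (v : Char) : List Char → Nat
  | [] => 0
  | c :: rest => if c ≠ v then 0 else runA v rest + 1

def is_repeat (seq : String) (i : Int) (repeatno : Int) : Bool :=
  let l := seq.toList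
  match PySem.List.pyGet? l i with
  | none => false   -- IndexError: excluded by Pre_
  | some v =>
    let tail := runA v (PySem.List.slice l (some (i+1)) none)   -- seq[i+1:]
    let head := runA v ((PySem.List.slice l none (some i)).reverse)   -- seq[:i][::-1]
    decide (repeatno ≤ (tail : Int) + (head : Int) + 1)

-- ===== PORT B =====
-- the inner 'while end < n and seq[end] == seq[start]' scan of B
def runB (v : Char) : List Char → Nat
  | [] => 0
  | c :: rest => if c = v then runB v rest + 1 else 0

-- the outer 'while True' loop of B: walk maximal runs until the one containing j
def scanB (l : List Char) (j : Nat) (r : Int) : Bool :=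
  match l with
  | [] => false   -- unreachable: j is a valid index
  | c :: rest =>
    let k := runB c rest + 1    -- end - start of the current run
    if j < k then decide (r ≤ (k : Int))
    else scanB (rest.drop (runB c rest)) (j - k) r
termination_by l.length
decreasing_by
  simp only [List.length_drop, List.length_cons]
  omega

def is_repeat_alt (seq : String) (i : Int) (repeatno : Int) : Bool :=
  let l := seq.toList
  let n : Int := l.length
  let j := if i < 0 then i + n else i
  if 0 ≤ j ∧ j < n then scanB l j.toNat repeatno else false   -- else: IndexError, excluded by Pre_

-- ===== PRECONDITION & SPEC =====
-- Pre_ excludes exactly the out-of-range indices, on which A (seq[i]) and B both raise IndexError.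
def Pre_is_repeat (seq : String) (i : Int) (repeatno : Int) : Prop :=
  -(seq.toList.length : Int) ≤ i ∧ i < (seq.toList.length : Int)
instance (seq : String) (i : Int) (repeatno : Int) : Decidable (Pre_is_repeat seq i repeatno) := by
  unfold Pre_is_repeat; infer_instance

def pvWitness_is_repeat : String × Int × Int := ("aab", 0, 2)

-- For i = -1 (and only then) seq[i+1:] is the whole string, so A adds the string's leading run of
-- the last character to the true run length and returns True for repeatno up to that inflated sum;
-- B returns whether the actual run containing the last character reaches repeatno, which is intended.
def D_is_repeat (seq : String) (i : Int) (repeatno : Int) : Prop :=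
  let r := seq.toList.reverse
  let f := fun l : List Char => ((l.takeWhile (· == r.headI)).length : Int)
  i = -1 ∧ f r < repeatno ∧ repeatno ≤ f r + f r.reverse
instance (seq : String) (i : Int) (repeatno : Int) : Decidable (D_is_repeat seq i repeatno) := by
  unfold D_is_repeat; infer_instance

def Spec_is_repeat (seq : String) (i : Int) (repeatno : Int) (out : Bool) : Prop :=
  ¬ D_is_repeat seq i repeatno → out = is_repeat_alt seq i repeatno
instance (seq : String) (i : Int) (repeatno : Int) (out : Bool) : Decidable (Spec_is_repeat seq i repeatno out) := by
  unfold Spec_is_repeat; infer_instance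

def pvDiffWitness_is_repeat : String × Int × Int := ("aa", -1, 3)
def pvDiffWitnessOut_is_repeat : Bool × Bool := (true, false)

-- ===== CLAIM (what is proved, stated in full; the proofs are below) =====
def Claim_unchanged_is_repeat : Prop := ∀ (seq : String) (i : Int) (repeatno : Int), Dom_is_repeat seq i repeatno → Pre_is_repeat seq i repeatno → Spec_is_repeat seq i repeatno (is_repeat seq i repeatno)
def Claim_changed_is_repeat : Prop := Dom_is_repeat (pvDiffWitness_is_repeat.1) (pvDiffWitness_is_repeat.2.1) (pvDiffWitness_is_repeat.2.2) ∧ Pre_is_repeat (pvDiffWitness_is_repeat.1) (pvDiffWitness_is_repeat.2.1) (pvDiffWitness_is_repeat.2.2) ∧ D_is_repeat (pvDiffWitness_is_repeat.1) (pvDiffWitness_is_repeat.2.1) (pvDiffWitness_is_repeat.2.2) ∧ is_repeat (pvDiffWitness_is_repeat.1) (pvDiffWitness_is_repeat.2.1) (pvDiffWitness_is_repeat.2.2) = pvDiffWitnessOut_is_repeat.1 ∧ is_repeat_alt (pvDiffWitness_is_repeat.1) (pvDiffWitness_is_repeat.2.1) (pvDiffWitness_is_repeat.2.2) = pvDiffWitnessOut_is_repeat.2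 ∧ pvDiffWitnessOut_is_repeat.1 ≠ pvDiffWitnessOut_is_repeat.2
def Claim_exact_is_repeat : Prop := ∀ (seq : String) (i : Int) (repeatno : Int), Dom_is_repeat seq i repeatno → Pre_is_repeat seq i repeatno → D_is_repeat seq i repeatno → is_repeat seq i repeatno ≠ is_repeat_alt seq i repeatno

-- ===== LEMMAS AND PROOFS =====

theorem runA_eq_runB (v : Char) (xs : List Char) : runA v xs = runB v xs := by
  induction xs with
  | nil => rfl
  | cons c rest ih => simp only [runA, runB]; by_cases h : c = v <;> simp [h, ih]

theorem runB_takeWhile (c : Char) (xs : List Char) :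
    xs.takeWhile (· == c) = List.replicate (runB c xs) c := by
  induction xs with
  | nil => rfl
  | cons x rest ih =>
    by_cases h : x = c
    · subst h; simp [runB, ih, List.replicate_succ]
    · simp [runB, h]

theorem head_dropWhile_ne (c : Char) (xs : List Char) :
    ∀ x ∈ (xs.dropWhile (· == c)).head?, ¬ x = c := by
  induction xs with
  | nil => simp
  | cons y rest ih =>
    by_cases h : y = c
    · simpa [List.dropWhile_cons, h] using ih
    · simp [h]

theorem runB_replicate_self (c : Char) (m : Nat) : runB c (List.replicate m c) = m := by
  induction m with
  | zero => rfl
  | succ m ih => simp [List.replicate_succ, runB, ih]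

theorem runB_append (v : Char) (xs ys : List Char) :
    runB v (xs ++ ys) = if runB v xs = xs.length then xs.length + runB v ys else runB v xs := by
  induction xs with
  | nil => simp [runB]
  | cons x rest ih =>
    by_cases h : x = v
    · simp only [List.cons_append, runB, if_pos h, ih, List.length_cons]
      split_ifs <;> omega
    · simp [runB, h]

theorem runB_eq_length (v : Char) (xs : List Char) (h : runB v xs = xs.length) :
    ∀ x ∈ xs, x = v := by
  induction xs with
  | nil => simp
  | cons x rest ih =>
    simp only [runB] at h
    by_cases hx : x = v
    · rw [if_pos hx] at h
      simp only [List.length_cons] at h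
      intro y hy
      rcases List.mem_cons.mp hy with rfl | hy
      · exact hx
      · exact ih (by omega) y hy
    · rw [if_neg hx] at h; simp at h

theorem runB_replicate_ne (v c : Char) (m : Nat) (h : v ≠ c) :
    runB v (List.replicate m c) = 0 := by
  cases m with
  | zero => rfl
  | succ m => simp [List.replicate_succ, runB, Ne.symm h]

theorem runB_replicate_append_self (c : Char) (m : Nat) (t : List Char) :
    runB c (List.replicate m c ++ t) = m + runB c t := by
  rw [runB_append, runB_replicate_self]
  simp [List.length_replicate]

-- extending the "head" list past the run of c does not change the count, when the
-- anchor value is an element of t (whose head differs from c)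
theorem runB_append_replicate (c : Char) (t : List Char) (k j' : Nat)
    (ht : ∀ x ∈ t.head?, ¬ x = c) (hj : j' < t.length) :
    runB t[j'] ((t.take j').reverse ++ List.replicate k c) = runB t[j'] ((t.take j').reverse) := by
  rw [runB_append]
  split_ifs with h
  · have hallrev := runB_eq_length _ _ h
    have hall : ∀ x ∈ t.take j', x = t[j'] := by
      intro x hx; exact hallrev x (List.mem_reverse.mpr hx)
    have hvc : t[j'] ≠ c := by
      cases t with
      | nil => simp at hj
      | cons y rest =>
        cases j' with
        | zero => simpa using ht y (by simp)
        | succ m =>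
          have hy : y = (y :: rest)[m + 1] := hall y (by simp [List.take_succ_cons])
          rw [← hy]
          simpa using ht y (by simp)
    rw [runB_replicate_ne _ _ _ hvc, h]
    omega
  · rfl

theorem scanB_spec_aux : ∀ (n : Nat) (l : List Char), l.length ≤ n → ∀ (j : Nat) (r : Int), (hj : j < l.length) →
    scanB l j r = decide (r ≤ (runB l[j] ((l.take j).reverse) : Int) + (runB l[j] (l.drop (j+1)) : Int) + 1) := by
  intro n
  induction n with
  | zero => intro l hl j r hj; omega
  | succ n ih =>
    intro l hl j r hj
    match l with
    | [] => simp at hj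
    | c :: rest =>
      set k0 := runB c rest with hk0
      have hdecomp : rest = List.replicate k0 c ++ rest.dropWhile (· == c) := by
        conv_lhs => rw [← List.takeWhile_append_dropWhile (p := (· == c)) (l := rest)]
        rw [runB_takeWhile]
      set t := rest.dropWhile (· == c) with htdef
      have hl2 : c :: rest = List.replicate (k0 + 1) c ++ t := by
        rw [List.replicate_succ]; simpa using hdecomp
      have hlen : rest.length = k0 + t.length := by
        conv_lhs => rw [hdecomp]
        simp
      have hl' : rest.length ≤ n := by simpa using hl
      have hj2 : j < rest.length + 1 := by simpa using hj
      have hthead := head_dropWhile_ne c rest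
      rw [show (rest.dropWhile (· == c)) = t from rfl] at hthead
      by_cases hcase : j < k0 + 1
      · -- inside the first run
        rw [scanB, if_pos hcase]
        have hget : (c :: rest)[j]'hj = c := by
          rw [List.getElem_of_eq hl2 hj, List.getElem_append_left (by simpa using hcase)]
          simp
        have htake : (c :: rest).take j = List.replicate j c := by
          rw [hl2, List.take_append]
          simp only [List.take_replicate, List.length_replicate]
          rw [show min j (k0+1) = j by omega, show j - (k0+1) = 0 by omega]
          simp
        have hdrop : (c :: rest).drop (j+1) = List.replicate (k0 - j) c ++ t := by
          rw [hl2, List.drop_append]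
          simp only [List.drop_replicate, List.length_replicate]
          rw [show (j+1) - (k0+1) = 0 by omega, show (k0+1) - (j+1) = k0 - j by omega]
          simp
        have htz : runB c t = 0 := by
          rcases hteq : t with _ | ⟨x, rest'⟩
          · rfl
          · have hxc := hthead x (by rw [hteq]; simp)
            simp [runB, hxc]
        simp only [hget, htake, hdrop, List.reverse_replicate, runB_replicate_self,
            runB_replicate_append_self, htz]
        have : (j : Int) + ((k0 - j + 0 : Nat) : Int) + 1 = ((k0 : Int) + 1) := by omega
        rw [this]
        norm_num
        rw [hk0]
      · -- recurse into the rest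
        rw [scanB, if_neg hcase]
        have hdropk0 : rest.drop k0 = t := by
          conv_lhs => rw [hdecomp]
          rw [List.drop_append]
          simp
        have hj' : j - (k0 + 1) < t.length := by omega
        have ihr := ih t (by omega) (j - (k0 + 1)) r hj'
        rw [hdropk0, ihr]
        -- now rewrite the RHS pieces
        have hget : (c :: rest)[j]'hj = t[j - (k0+1)]'hj' := by
          rw [List.getElem_of_eq hl2 hj, List.getElem_append_right (by simp; omega)]
          simp
        have htake : (c :: rest).take j = List.replicate (k0+1) c ++ t.take (j - (k0+1)) := by
          rw [hl2, List.take_append]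
          simp only [List.take_replicate, List.length_replicate]
          rw [show min j (k0+1) = k0+1 by omega]
        have hdrop : (c :: rest).drop (j+1) = t.drop (j - (k0+1) + 1) := by
          rw [hl2, List.drop_append]
          simp only [List.drop_replicate, List.length_replicate]
          rw [show (k0+1) - (j+1) = 0 by omega, show (j+1) - (k0+1) = j - (k0+1) + 1 by omega]
          simp
        simp only [hget, htake, hdrop, List.reverse_append, List.reverse_replicate,
            runB_append_replicate c t (k0+1) (j - (k0+1)) hthead hj']

theorem scanB_spec (l : List Char) (j : Nat) (r : Int) (hj : j < l.length) :
    scanB l j r = decide (r ≤ (runB l[j] ((l.take j).reverse) : Int) + (runB l[j] (l.drop (j+1)) : Int) + 1) :=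
  scanB_spec_aux l.length l (le_refl _) j r hj

-- unified closed forms of both ports on in-range inputs
theorem alt_closed (seq : String) (i : Int) (repeatno : Int) (h0 : 0 ≤ i) (h1 : i < (seq.toList.length : Int)) :
    is_repeat_alt seq i repeatno =
      decide (repeatno ≤ (runB (seq.toList[i.toNat]'(by omega)) ((seq.toList.take i.toNat).reverse) : Int)
        + (runB (seq.toList[i.toNat]'(by omega)) (seq.toList.drop (i.toNat+1)) : Int) + 1) := by
  simp only [is_repeat_alt]
  rw [if_neg (show ¬ i < 0 by omega),
      if_pos (show 0 ≤ i ∧ i < ((seq.toList.length : Nat) : Int) from ⟨h0, h1⟩)]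
  exact scanB_spec _ _ _ (by omega)

theorem alt_closed_neg (seq : String) (i : Int) (repeatno : Int) (h0 : i < 0) (h1 : -(seq.toList.length:Int) ≤ i) :
    is_repeat_alt seq i repeatno =
      decide (repeatno ≤ (runB (seq.toList[(i + seq.toList.length).toNat]'(by omega)) ((seq.toList.take (i + seq.toList.length).toNat).reverse) : Int)
        + (runB (seq.toList[(i + seq.toList.length).toNat]'(by omega)) (seq.toList.drop ((i + seq.toList.length).toNat+1)) : Int) + 1) := by
  simp only [is_repeat_alt]
  rw [if_pos (show i < 0 from h0),
      if_pos (show 0 ≤ i + ((seq.toList.length : Nat) : Int) ∧ i + ((seq.toList.length : Nat) : Int) < ((seq.toList.length : Nat) : Int) from ⟨by omega, by omega⟩)]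
  exact scanB_spec _ _ _ (by omega)

theorem a_closed (seq : String) (i : Int) (repeatno : Int) (h0 : 0 ≤ i) (h1 : i < (seq.toList.length : Int)) :
    is_repeat seq i repeatno =
      decide (repeatno ≤ (runB (seq.toList[i.toNat]'(by omega)) ((seq.toList.take i.toNat).reverse) : Int)
        + (runB (seq.toList[i.toNat]'(by omega)) (seq.toList.drop (i.toNat+1)) : Int) + 1) := by
  have hg : PySem.List.pyGet? seq.toList i = some (seq.toList[i.toNat]'(by omega)) :=
    PySem.List.pyGet?_eq_some_getElem _ h0 h1
  have hs1 : PySem.List.slice seq.toList (some (i+1)) none = seq.toList.drop (i.toNat + 1) := by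
    rw [PySem.List.slice_from _ (by omega)]
    congr 1
    omega
  have hs2 : PySem.List.slice seq.toList none (some i) = seq.toList.take i.toNat :=
    PySem.List.slice_to _ h0
  simp only [is_repeat, hg, hs1, hs2, runA_eq_runB]
  ring_nf

theorem a_closed_neg (seq : String) (i : Int) (repeatno : Int) (h0 : i < -1) (h1 : -(seq.toList.length:Int) ≤ i) :
    is_repeat seq i repeatno =
      decide (repeatno ≤ (runB (seq.toList[(i + seq.toList.length).toNat]'(by omega)) ((seq.toList.take (i + seq.toList.length).toNat).reverse) : Int)
        + (runB (seq.toList[(i + seq.toList.length).toNat]'(by omega)) (seq.toList.drop ((i + seq.toList.length).toNat+1)) : Int) + 1) := by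
  have hg : PySem.List.pyGet? seq.toList i = some (seq.toList[(i + seq.toList.length).toNat]'(by omega)) := by
    have h2 := PySem.List.pyGet?_neg_natCast seq.toList (-i).toNat (by omega) (by omega)
    rw [show -(((-i).toNat : Nat) : Int) = i by omega] at h2
    have hidx2 : seq.toList.length - (-i).toNat = (i + (seq.toList.length : Int)).toNat := by omega
    rw [h2, hidx2, List.getElem?_eq_getElem (by omega)]
  have hs1 : PySem.List.slice seq.toList (some (i+1)) none = seq.toList.drop ((i + seq.toList.length).toNat + 1) := by
    have h2 := PySem.List.slice_from_neg_natCast seq.toList ((-i).toNat - 1) (by omega)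
    rw [show -((((-i).toNat - 1 : Nat)) : Int) = i + 1 by omega] at h2
    rw [h2]
    congr 1
    omega
  have hs2 : PySem.List.slice seq.toList none (some i) = seq.toList.take (i + seq.toList.length).toNat := by
    have h2 := PySem.List.slice_to_neg_natCast seq.toList (-i).toNat (by omega)
    rw [show -(((-i).toNat : Nat) : Int) = i by omega] at h2
    rw [h2]
    congr 1
    omega
  simp only [is_repeat, hg, hs1, hs2, runA_eq_runB]
  ring_nf

-- the i = -1 analysis: A counts p + q + 1 where p is the leading run of the last char
-- and q+1 the trailing run; B counts q + 1.
theorem neg_one_closed (seq : String) (repeatno : Int) (hne : seq.toList ≠ []) :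
    is_repeat seq (-1) repeatno
      = decide (repeatno ≤ (runB (seq.toList.getLast hne) seq.toList : Int)
          + (runB (seq.toList.getLast hne) seq.toList.dropLast.reverse : Int) + 1) ∧
    is_repeat_alt seq (-1) repeatno
      = decide (repeatno ≤ (runB (seq.toList.getLast hne) seq.toList.dropLast.reverse : Int) + 1) := by
  constructor
  · have hg : PySem.List.pyGet? seq.toList (-1) = some (seq.toList.getLast hne) := by
      rw [PySem.List.pyGet?_neg_one, List.getLast?_eq_getLast_of_ne_nil hne]
    have hs1 : PySem.List.slice seq.toList (some ((-1 : Int) + 1)) none = seq.toList := by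
      rw [show ((-1 : Int) + 1) = ((0 : Nat) : Int) by norm_num, PySem.List.slice_from_natCast]
      simp
    have hs2 : PySem.List.slice seq.toList none (some (-1 : Int)) = seq.toList.dropLast :=
      PySem.List.slice_to_neg_one _
    simp only [is_repeat, hg, hs1, hs2, runA_eq_runB]
  · have hlen : 0 < seq.toList.length := List.length_pos_of_ne_nil hne
    rw [alt_closed_neg seq (-1) repeatno (by omega) (by omega)]
    have hidx : (-1 + (seq.toList.length : Int)).toNat = seq.toList.length - 1 := by omega
    have hget : seq.toList[(-1 + (seq.toList.length:Int)).toNat]'(by omega) = seq.toList.getLast hne := by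
      rw [List.getLast_eq_getElem]
      congr 1
    have htake : seq.toList.take (-1 + (seq.toList.length:Int)).toNat = seq.toList.dropLast := by
      rw [hidx, List.dropLast_eq_take]
    have hdrop : seq.toList.drop ((-1 + (seq.toList.length:Int)).toNat + 1) = [] := by
      rw [hidx, List.drop_eq_nil_iff]
      omega
    rw [hget, htake, hdrop]
    simp [runB]

theorem reverse_eq_last_cons (seq : String) (hne : seq.toList ≠ []) :
    seq.toList.reverse = seq.toList.getLast hne :: seq.toList.dropLast.reverse := by
  conv_lhs => rw [← List.dropLast_append_getLast hne]
  simp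

theorem headI_reverse_eq (seq : String) (hne : seq.toList ≠ []) :
    seq.toList.reverse.headI = seq.toList.getLast hne := by
  rw [reverse_eq_last_cons seq hne]
  rfl

theorem runB_reverse_last (seq : String) (hne : seq.toList ≠ []) :
    runB (seq.toList.getLast hne) seq.toList.reverse
      = runB (seq.toList.getLast hne) seq.toList.dropLast.reverse + 1 := by
  rw [reverse_eq_last_cons seq hne]
  simp [runB]

theorem runB_takeWhile_len (v : Char) (xs : List Char) :
    (xs.takeWhile (· == v)).length = runB v xs := by
  rw [runB_takeWhile]
  simp


-- ===== VERDICT (by name: the statement is the Claim_ definition above) =====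
theorem is_repeat_spec : Claim_unchanged_is_repeat := by
  intro seq i repeatno _hdom hpre hnd
  unfold Pre_is_repeat at hpre
  by_cases h0 : 0 ≤ i
  · rw [a_closed seq i repeatno h0 hpre.2, alt_closed seq i repeatno h0 hpre.2]
  · by_cases h1 : i = -1
    · subst h1
      have hne : seq.toList ≠ [] := by
        intro hnil
        rw [hnil] at hpre
        simp at hpre
      have hcf := neg_one_closed seq repeatno hne
      rw [hcf.1, hcf.2]
      have hD2 : ¬ (((runB (seq.toList.getLast hne) seq.toList.dropLast.reverse + 1 : Nat) : Int) < repeatno ∧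
          repeatno ≤ ((runB (seq.toList.getLast hne) seq.toList.dropLast.reverse + 1 : Nat) : Int)
            + ((runB (seq.toList.getLast hne) seq.toList : Nat) : Int)) := by
        intro hc
        apply hnd
        unfold D_is_repeat
        simp only [headI_reverse_eq seq hne, List.reverse_reverse, runB_takeWhile_len,
          runB_reverse_last seq hne]
        exact ⟨trivial, hc.1, hc.2⟩
      apply decide_eq_decide.mpr
      constructor <;> intro <;> omega
    · rw [a_closed_neg seq i repeatno (by omega) hpre.1,
         alt_closed_neg seq i repeatno (by omega) hpre.1]

theorem is_repeat_changed : Claim_changed_is_repeat := by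
  unfold Claim_changed_is_repeat
  refine ⟨by decide, by decide, by decide, by decide, ?_, by decide⟩
  show is_repeat_alt "aa" (-1) 3 = false
  rw [(neg_one_closed "aa" 3 (by decide)).2]
  decide

theorem is_repeat_tight : Claim_exact_is_repeat := by
  intro seq i repeatno _hdom hpre hD
  unfold D_is_repeat at hD
  obtain ⟨hi, hlt, hle⟩ := hD
  subst hi
  unfold Pre_is_repeat at hpre
  have hne : seq.toList ≠ [] := by
    intro hnil
    rw [hnil] at hpre
    simp at hpre
  have hcf := neg_one_closed seq repeatno hne
  rw [hcf.1, hcf.2]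
  simp only [headI_reverse_eq seq hne, List.reverse_reverse, runB_takeWhile_len,
    runB_reverse_last seq hne] at hlt hle
  have h1 : repeatno ≤ ((runB (seq.toList.getLast hne) seq.toList : Nat) : Int)
      + ((runB (seq.toList.getLast hne) seq.toList.dropLast.reverse : Nat) : Int) + 1 := by omega
  have h2 : ¬ (repeatno ≤ ((runB (seq.toList.getLast hne) seq.toList.dropLast.reverse : Nat) : Int) + 1) := by omega
  simp [h1, h2]
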